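-- pv_equiv track=rewrite | github.com/kiriappeee/advent-of-code | 2017/python/day04.py | is_passphrase_valid_with_new_rules
-- ===== SOURCE A (Python) =====
-- def is_passphrase_valid(passphrase_to_validate):
--     phrases = passphrase_to_validate.split(' ')
--     if len(phrases) > len(list(set(phrases))):
--         return False
--     else:
--         return True
--
-- def is_passphrase_valid_with_new_rules(passphrase_to_validate):
--     if not is_passphrase_valid(passphrase_to_validate):
--         return False
--     else:
--         phrases = passphrase_to_validate.split(' ')
--         checked_phrases_list = [''.join(sorted(phrase)) for phrase in phrases]
--         if len(phrases) > len(list(set(checked_phrases_list))):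
--             return False
--     return True
-- ===== SOURCE B (Python) =====
-- def is_passphrase_valid_with_new_rules(passphrase_to_validate):
--     # sort-then-adjacent-scan: duplicates are anagrams of themselves, so one check suffices
--     norms = [''.join(sorted(word)) for word in passphrase_to_validate.split(' ')]
--     norms.sort()
--     i = 1
--     while i < len(norms):
--         if norms[i] == norms[i - 1]:
--             return False
--         i += 1
--     return True
-- ===== Notes on version B (the rewrite author's own statement) =====
-- stated objective: simpler
-- what changed: B drops A's redundant duplicate-word set check and replaces both set-cardinality comparisons by one pass: normalise each word to its sorted characters, sort the list of normalised words, and scan adjacent pairs for equality.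
import Mathlib
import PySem

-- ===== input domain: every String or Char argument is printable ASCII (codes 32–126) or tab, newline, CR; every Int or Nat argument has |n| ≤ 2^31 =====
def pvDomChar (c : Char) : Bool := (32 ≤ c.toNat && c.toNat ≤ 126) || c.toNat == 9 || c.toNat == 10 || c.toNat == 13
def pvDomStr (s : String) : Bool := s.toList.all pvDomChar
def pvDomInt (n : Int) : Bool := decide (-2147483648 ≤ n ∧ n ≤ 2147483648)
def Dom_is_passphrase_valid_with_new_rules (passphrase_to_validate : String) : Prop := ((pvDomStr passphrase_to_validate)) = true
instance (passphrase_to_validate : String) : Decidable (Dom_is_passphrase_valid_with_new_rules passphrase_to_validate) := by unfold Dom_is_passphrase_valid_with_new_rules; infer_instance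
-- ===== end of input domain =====

-- B replaces A's two set-cardinality checks by one sort-then-adjacent-scan over the
-- anagram-normalised words (simpler: duplicates are anagrams of themselves, so one check suffices).

-- ===== PORT A =====
-- helper of A: is_passphrase_valid.  split(' ') with a non-empty separator: split? is exact, getD unreachable
def pv_is_passphrase_valid (passphrase_to_validate : String) : Bool :=
  let phrases := (PySem.Str.split? passphrase_to_validate " ").getD []
  if phrases.length > (PySem.Set.ofList phrases).length then false else true

def is_passphrase_valid_with_new_rules (passphrase_to_validate : String) : Bool :=
  if !(pv_is_passphrase_valid passphrase_to_validate) then false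
  else
    let phrases := (PySem.Str.split? passphrase_to_validate " ").getD []
    -- ''.join(sorted(phrase)): sorting the code points and rebuilding the string is exact
    let checked_phrases_list := phrases.map
      (fun phrase => String.ofList (PySem.List.sorted phrase.toList (fun c => c) false))
    if phrases.length > (PySem.Set.ofList checked_phrases_list).length then false else true

-- ===== PORT B =====
-- Source B's while loop over indices 1..len-1 comparing norms[i] with norms[i-1], as structural recursion
def pvAdjScan : List String → Bool
  | [] => true
  | [_] => true
  | x :: y :: t => if y == x then false else pvAdjScan (y :: t)

def is_passphrase_valid_with_new_rules_alt (passphrase_to_validate : String) : Bool :=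
  let norms := ((PySem.Str.split? passphrase_to_validate " ").getD []).map
    (fun word => String.ofList (PySem.List.sorted word.toList (fun c => c) false))
  pvAdjScan (PySem.List.sorted norms (fun x => x) false)

-- ===== PRECONDITION & SPEC =====
def Spec_is_passphrase_valid_with_new_rules (passphrase_to_validate : String) (out : Bool) : Prop := out = is_passphrase_valid_with_new_rules_alt passphrase_to_validate
instance (passphrase_to_validate : String) (out : Bool) : Decidable (Spec_is_passphrase_valid_with_new_rules passphrase_to_validate out) := by unfold Spec_is_passphrase_valid_with_new_rules; infer_instance

-- ===== CLAIM (what is proved, stated in full; the proofs are below) =====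
def Claim_equal_is_passphrase_valid_with_new_rules : Prop := ∀ (passphrase_to_validate : String), Dom_is_passphrase_valid_with_new_rules passphrase_to_validate → Spec_is_passphrase_valid_with_new_rules passphrase_to_validate (is_passphrase_valid_with_new_rules passphrase_to_validate)

-- ===== LEMMAS AND PROOFS =====

-- set(xs) has as many elements as xs exactly when xs has no duplicates
lemma pv_length_ofList_eq_iff {α : Type} [DecidableEq α] (xs : List α) :
    (PySem.Set.ofList xs).length = xs.length ↔ xs.Nodup := by
  induction xs using List.reverseRecOn with
  | nil => simp
  | append_singleton xs x ih =>
    rw [PySem.Set.ofList_append_singleton]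
    by_cases hx : x ∈ xs
    · have hxs : x ∈ PySem.Set.ofList xs := (PySem.Set.mem_ofList _ _).mpr hx
      rw [PySem.Set.add_of_mem hxs]
      have hlen : (PySem.Set.ofList xs).length ≤ xs.length := PySem.Set.length_ofList_le xs
      constructor
      · intro h; exfalso; rw [List.length_append] at h; simp at h; omega
      · intro h; exfalso
        exact (List.disjoint_of_nodup_append h) hx (by simp)
    · have hxs : x ∉ PySem.Set.ofList xs := fun h => hx ((PySem.Set.mem_ofList _ _).mp h)
      rw [PySem.Set.add_of_not_mem hxs]
      simp [List.nodup_append, ih]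
      exact fun _ a ha h => hx (h ▸ ha)

-- the adjacent scan succeeds exactly when no two neighbours are equal
lemma pvAdjScan_iff (l : List String) : pvAdjScan l = true ↔ l.IsChain (· ≠ ·) := by
  induction l with
  | nil => simp [pvAdjScan]
  | cons x t ih =>
    cases t with
    | nil => simp [pvAdjScan]
    | cons y t' =>
      rw [List.isChain_cons_cons, ← ih]
      by_cases h : y = x
      · simp [pvAdjScan, h]
      · simp [pvAdjScan, h, Ne.symm h]

-- on a ≤-sorted list, adjacent distinctness is exactly Nodup
lemma pv_chain_ne_iff_nodup (l : List String) (hs : l.Pairwise (· ≤ ·)) :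
    l.IsChain (· ≠ ·) ↔ l.Nodup := by
  constructor
  · intro hc
    induction l with
    | nil => simp
    | cons x t ih =>
      rw [List.isChain_cons] at hc
      rw [List.pairwise_cons] at hs
      rw [List.nodup_cons]
      refine ⟨?_, ih hs.2 hc.2⟩
      intro hx
      cases t with
      | nil => simp at hx
      | cons y t' =>
        have hxy : x ≠ y := hc.1 y rfl
        have hlt : x < y := lt_of_le_of_ne (hs.1 y (by simp)) hxy
        rcases List.mem_cons.mp hx with h | h
        · exact hxy h
        · have hyx : y ≤ x := (List.pairwise_cons.mp hs.2).1 x h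
          exact absurd (lt_of_lt_of_le hlt hyx) (lt_irrefl x)
  · intro hn
    exact List.Pairwise.isChain hn

-- ===== VERDICT (by name: the statement is the Claim_ definition above) =====
theorem is_passphrase_valid_with_new_rules_spec : Claim_equal_is_passphrase_valid_with_new_rules := by
  intro s _
  show is_passphrase_valid_with_new_rules s = is_passphrase_valid_with_new_rules_alt s
  simp only [is_passphrase_valid_with_new_rules, is_passphrase_valid_with_new_rules_alt,
    pv_is_passphrase_valid]
  set phrases := (PySem.Str.split? s " ").getD [] with hph
  set checked := phrases.map (fun phrase => String.ofList (PySem.List.sorted phrase.toList (fun c => c) false)) with hch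
  have hClen : (PySem.Set.ofList checked).length ≤ checked.length := PySem.Set.length_ofList_le checked
  have hmaplen : checked.length = phrases.length := by simp [hch]
  have hright : pvAdjScan (PySem.List.sorted checked (fun x => x) false) = true ↔ checked.Nodup := by
    rw [pvAdjScan_iff, pv_chain_ne_iff_nodup _ (PySem.List.sorted_pairwise checked (fun x => x)),
        (PySem.List.sorted_perm checked (fun x => x) false).nodup_iff]
  rw [Bool.eq_iff_iff, hright]
  by_cases h1 : phrases.length > (PySem.Set.ofList phrases).length
  · simp only [h1, if_true, Bool.not_false, Bool.false_eq_true, false_iff]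
    intro hcn
    have hpn : phrases.Nodup := hcn.of_map _
    rw [(pv_length_ofList_eq_iff phrases).mpr hpn] at h1
    omega
  · by_cases h2 : phrases.length > (PySem.Set.ofList checked).length
    · simp only [h1, h2, if_false, if_true, Bool.not_true, Bool.false_eq_true, false_iff]
      intro hcn
      rw [(pv_length_ofList_eq_iff checked).mpr hcn, hmaplen] at h2
      omega
    · simp only [h1, h2, if_false, Bool.not_true]
      simp only [Bool.false_eq_true, if_false, true_iff]
      exact (pv_length_ofList_eq_iff checked).mp (by omega)
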